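-- pv_equiv track=rewrite | github.com/pypi-data/pypi-mirror-22 | packages/coquery/coquery-0.10.0.1-py2.py3-none-any.whl/coquery/installer/coq_install_celex.py | dia_to_unicode
-- ===== SOURCE A (Python) =====
-- import unicodedata
--
-- def dia_to_unicode(s):
--     """
--     Translates a string that contains CELEX encodings of diacritics to a
--     Unicode string.
--
--     Parameters
--     ----------
--     s : string
--         A string containing CELEX diacritics (see CELEX/english/eol/README
--         for details)
--
--     Returns
--     -------
--     s : string
--         The corresponding unicode string
--     """
--
--     encoded_diacritics = {
--         "#": "COMBINING ACUTE ACCENT",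
--         "`": "COMBINING GRAVE ACCENT",
--         '"': "COMBINING DIAERESIS",
--         "^": "COMBINING CIRCUMFLEX ACCENT",
--         ",": "COMBINING CEDILLA",
--         "~": "COMBINING TILDE",
--         "@": "COMBINING RING ABOVE"}
--
--     diacritic = None
--     char_list = []
--     for ch in s:
--         if ch in encoded_diacritics:
--             diacritic = unicodedata.lookup(encoded_diacritics[ch])
--         else:
--             char_list.append(ch)
--             # add diacritics:
--             if diacritic:
--                 char_list.append(diacritic)
--                 diacritic = None
--     # join and normalize characters:
--     unicode_string = unicodedata.normalize("NFC", "".join(char_list))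
--     return unicode_string
-- ===== SOURCE B (Python) =====
-- import unicodedata
--
-- _COMB = {k: unicodedata.lookup(v) for k, v in {
--     "#": "COMBINING ACUTE ACCENT",
--     "`": "COMBINING GRAVE ACCENT",
--     '"': "COMBINING DIAERESIS",
--     "^": "COMBINING CIRCUMFLEX ACCENT",
--     ",": "COMBINING CEDILLA",
--     "~": "COMBINING TILDE",
--     "@": "COMBINING RING ABOVE"}.items()}
--
--
-- def dia_to_unicode(s):
--     # Right-to-left scan building the output back-to-front: a base character is
--     # held as `pending` until the next (reversed) character shows whether a
--     # marker run precedes it; the first marker met in reverse is the last one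
--     # of its run, which is the one that wins.  Each base+mark pair is
--     # NFC-normalized locally; no whole-string pass is needed.
--     chunks = []
--     pending = None
--     for ch in reversed(s):
--         if ch in _COMB:
--             if pending is not None:
--                 chunks.append(unicodedata.normalize("NFC", pending + _COMB[ch]))
--                 pending = None
--         else:
--             if pending is not None:
--                 chunks.append(pending)
--             pending = ch
--     if pending is not None:
--         chunks.append(pending)
--     return "".join(reversed(chunks))
-- ===== Notes on version B (the rewrite author's own statement) =====
-- stated objective: alternative
-- what changed: Replaces A's forward loop threading a pending-diacritic variable plus one final whole-string NFC pass by a right-to-left scan that builds the output back-to-front, flushing each held base character with the first marker met in reverse (= last of its run) and NFC-normalizing each base+mark pair locally.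
import Mathlib
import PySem

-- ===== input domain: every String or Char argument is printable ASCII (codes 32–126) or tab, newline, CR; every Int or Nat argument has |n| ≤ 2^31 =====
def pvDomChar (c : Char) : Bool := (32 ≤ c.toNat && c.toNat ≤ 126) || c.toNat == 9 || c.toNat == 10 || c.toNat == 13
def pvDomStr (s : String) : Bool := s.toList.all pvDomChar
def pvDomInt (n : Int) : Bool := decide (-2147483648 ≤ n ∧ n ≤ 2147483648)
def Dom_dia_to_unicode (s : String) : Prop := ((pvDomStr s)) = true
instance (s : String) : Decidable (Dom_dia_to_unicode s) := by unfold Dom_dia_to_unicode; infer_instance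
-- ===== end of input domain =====

-- B replaces A's forward pending-diacritic loop + final whole-string NFC pass by a
-- right-to-left scan building the output back-to-front, NFC-composing each base+mark
-- pair locally (objective: alternative, same cost).

-- ===== PORT A =====
-- the marker dict, with unicodedata.lookup already resolved to the combining character
def encodedDiacritics : PySem.Dict Char Char := PySem.Dict.ofList [
  ('#', '\u0301'), ('`', '\u0300'), ('"', '\u0308'), ('^', '\u0302'),
  (',', '\u0327'), ('~', '\u0303'), ('@', '\u030a')]

-- NFC canonical-composition pairs (ASCII base, combining mark) -> precomposed char;
-- exact on the strings A builds from ASCII input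
def composeTable : List (Char × Char × Char) := [
  ('A', '\u0301', '\u00c1'),
  ('C', '\u0301', '\u0106'),
  ('E', '\u0301', '\u00c9'),
  ('G', '\u0301', '\u01f4'),
  ('I', '\u0301', '\u00cd'),
  ('K', '\u0301', '\u1e30'),
  ('L', '\u0301', '\u0139'),
  ('M', '\u0301', '\u1e3e'),
  ('N', '\u0301', '\u0143'),
  ('O', '\u0301', '\u00d3'),
  ('P', '\u0301', '\u1e54'),
  ('R', '\u0301', '\u0154'),
  ('S', '\u0301', '\u015a'),
  ('U', '\u0301', '\u00da'),
  ('W', '\u0301', '\u1e82'),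
  ('Y', '\u0301', '\u00dd'),
  ('Z', '\u0301', '\u0179'),
  ('a', '\u0301', '\u00e1'),
  ('c', '\u0301', '\u0107'),
  ('e', '\u0301', '\u00e9'),
  ('g', '\u0301', '\u01f5'),
  ('i', '\u0301', '\u00ed'),
  ('k', '\u0301', '\u1e31'),
  ('l', '\u0301', '\u013a'),
  ('m', '\u0301', '\u1e3f'),
  ('n', '\u0301', '\u0144'),
  ('o', '\u0301', '\u00f3'),
  ('p', '\u0301', '\u1e55'),
  ('r', '\u0301', '\u0155'),
  ('s', '\u0301', '\u015b'),
  ('u', '\u0301', '\u00fa'),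
  ('w', '\u0301', '\u1e83'),
  ('y', '\u0301', '\u00fd'),
  ('z', '\u0301', '\u017a'),
  ('A', '\u0300', '\u00c0'),
  ('E', '\u0300', '\u00c8'),
  ('I', '\u0300', '\u00cc'),
  ('N', '\u0300', '\u01f8'),
  ('O', '\u0300', '\u00d2'),
  ('U', '\u0300', '\u00d9'),
  ('W', '\u0300', '\u1e80'),
  ('Y', '\u0300', '\u1ef2'),
  ('a', '\u0300', '\u00e0'),
  ('e', '\u0300', '\u00e8'),
  ('i', '\u0300', '\u00ec'),
  ('n', '\u0300', '\u01f9'),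
  ('o', '\u0300', '\u00f2'),
  ('u', '\u0300', '\u00f9'),
  ('w', '\u0300', '\u1e81'),
  ('y', '\u0300', '\u1ef3'),
  ('A', '\u0308', '\u00c4'),
  ('E', '\u0308', '\u00cb'),
  ('H', '\u0308', '\u1e26'),
  ('I', '\u0308', '\u00cf'),
  ('O', '\u0308', '\u00d6'),
  ('U', '\u0308', '\u00dc'),
  ('W', '\u0308', '\u1e84'),
  ('X', '\u0308', '\u1e8c'),
  ('Y', '\u0308', '\u0178'),
  ('a', '\u0308', '\u00e4'),
  ('e', '\u0308', '\u00eb'),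
  ('h', '\u0308', '\u1e27'),
  ('i', '\u0308', '\u00ef'),
  ('o', '\u0308', '\u00f6'),
  ('t', '\u0308', '\u1e97'),
  ('u', '\u0308', '\u00fc'),
  ('w', '\u0308', '\u1e85'),
  ('x', '\u0308', '\u1e8d'),
  ('y', '\u0308', '\u00ff'),
  ('A', '\u0302', '\u00c2'),
  ('C', '\u0302', '\u0108'),
  ('E', '\u0302', '\u00ca'),
  ('G', '\u0302', '\u011c'),
  ('H', '\u0302', '\u0124'),
  ('I', '\u0302', '\u00ce'),
  ('J', '\u0302', '\u0134'),
  ('O', '\u0302', '\u00d4'),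
  ('S', '\u0302', '\u015c'),
  ('U', '\u0302', '\u00db'),
  ('W', '\u0302', '\u0174'),
  ('Y', '\u0302', '\u0176'),
  ('Z', '\u0302', '\u1e90'),
  ('a', '\u0302', '\u00e2'),
  ('c', '\u0302', '\u0109'),
  ('e', '\u0302', '\u00ea'),
  ('g', '\u0302', '\u011d'),
  ('h', '\u0302', '\u0125'),
  ('i', '\u0302', '\u00ee'),
  ('j', '\u0302', '\u0135'),
  ('o', '\u0302', '\u00f4'),
  ('s', '\u0302', '\u015d'),
  ('u', '\u0302', '\u00fb'),
  ('w', '\u0302', '\u0175'),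
  ('y', '\u0302', '\u0177'),
  ('z', '\u0302', '\u1e91'),
  ('C', '\u0327', '\u00c7'),
  ('D', '\u0327', '\u1e10'),
  ('E', '\u0327', '\u0228'),
  ('G', '\u0327', '\u0122'),
  ('H', '\u0327', '\u1e28'),
  ('K', '\u0327', '\u0136'),
  ('L', '\u0327', '\u013b'),
  ('N', '\u0327', '\u0145'),
  ('R', '\u0327', '\u0156'),
  ('S', '\u0327', '\u015e'),
  ('T', '\u0327', '\u0162'),
  ('c', '\u0327', '\u00e7'),
  ('d', '\u0327', '\u1e11'),
  ('e', '\u0327', '\u0229'),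
  ('g', '\u0327', '\u0123'),
  ('h', '\u0327', '\u1e29'),
  ('k', '\u0327', '\u0137'),
  ('l', '\u0327', '\u013c'),
  ('n', '\u0327', '\u0146'),
  ('r', '\u0327', '\u0157'),
  ('s', '\u0327', '\u015f'),
  ('t', '\u0327', '\u0163'),
  ('A', '\u0303', '\u00c3'),
  ('E', '\u0303', '\u1ebc'),
  ('I', '\u0303', '\u0128'),
  ('N', '\u0303', '\u00d1'),
  ('O', '\u0303', '\u00d5'),
  ('U', '\u0303', '\u0168'),
  ('V', '\u0303', '\u1e7c'),
  ('Y', '\u0303', '\u1ef8'),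
  ('a', '\u0303', '\u00e3'),
  ('e', '\u0303', '\u1ebd'),
  ('i', '\u0303', '\u0129'),
  ('n', '\u0303', '\u00f1'),
  ('o', '\u0303', '\u00f5'),
  ('u', '\u0303', '\u0169'),
  ('v', '\u0303', '\u1e7d'),
  ('y', '\u0303', '\u1ef9'),
  ('A', '\u030a', '\u00c5'),
  ('U', '\u030a', '\u016e'),
  ('a', '\u030a', '\u00e5'),
  ('u', '\u030a', '\u016f'),
  ('w', '\u030a', '\u1e98'),
  ('y', '\u030a', '\u1e99')]

def composePrim (a b : Char) : Option Char :=
  (composeTable.find? (fun e => e.1 == a && e.2.1 == b)).map (fun e => e.2.2)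

-- unicodedata.normalize("NFC", ·), hand-ported; exact on the strings A builds
-- (ASCII starters each followed by at most one combining mark)
def nfc : List Char → List Char
  | [] => []
  | [a] => [a]
  | a :: b :: rest =>
    match composePrim a b with
    | some d => d :: nfc rest
    | none => a :: nfc (b :: rest)

def stepA (st : Option Char × List Char) (ch : Char) : Option Char × List Char :=
  match PySem.Dict.get? encodedDiacritics ch with
  | some m => (some m, st.2)                              -- diacritic = unicodedata.lookup(...)
  | none =>
    match st.1 with
    | some d => (none, st.2 ++ [ch, d])                   -- append ch, then the pending diacritic
    | none => (none, st.2 ++ [ch])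

def dia_to_unicode (s : String) : String :=
  String.ofList (nfc (List.foldl stepA (none, []) s.toList).2)  -- join and normalize once

-- ===== PORT B =====
-- _COMB as a flat marker/combining pair string (same 7 markers, lookup resolved)
def markComb : String := "#\u0301`\u0300\"\u0308^\u0302,\u0327~\u0303@\u030a"

def scanPairs : List Char → Char → Option Char
  | a :: b :: rest, c => if a == c then some b else scanPairs rest c
  | _, _ => none

def combOf? (c : Char) : Option Char := scanPairs markComb.toList c  -- ch in _COMB / _COMB[ch]

-- model of unicodedata.normalize("NFC", base + _COMB[marker]), keyed directly by the
-- marker: flat (marker, base, precomposed) triples; exact on the ASCII domain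
def precompData : String := "#A\u00c1#C\u0106#E\u00c9#G\u01f4#I\u00cd#K\u1e30#L\u0139#M\u1e3e#N\u0143#O\u00d3#P\u1e54#R\u0154#S\u015a#U\u00da#W\u1e82#Y\u00dd#Z\u0179#a\u00e1#c\u0107#e\u00e9#g\u01f5#i\u00ed#k\u1e31#l\u013a#m\u1e3f#n\u0144#o\u00f3#p\u1e55#r\u0155#s\u015b#u\u00fa#w\u1e83#y\u00fd#z\u017a`A\u00c0`E\u00c8`I\u00cc`N\u01f8`O\u00d2`U\u00d9`W\u1e80`Y\u1ef2`a\u00e0`e\u00e8`i\u00ec`n\u01f9`o\u00f2`u\u00f9`w\u1e81`y\u1ef3\"A\u00c4\"E\u00cb\"H\u1e26\"I\u00cf\"O\u00d6\"U\u00dc\"W\u1e84\"X\u1e8c\"Y\u0178\"a\u00e4\"e\u00eb\"h\u1e27\"i\u00ef\"o\u00f6\"t\u1e97\"u\u00fc\"w\u1e85\"x\u1e8d\"y\u00ff^A\u00c2^C\u0108^E\u00ca^G\u011c^H\u0124^I\u00ce^J\u0134^O\u00d4^S\u015c^U\u00db^W\u0174^Y\u0176^Z\u1e90^a\u00e2^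c\u0109^e\u00ea^g\u011d^h\u0125^i\u00ee^j\u0135^o\u00f4^s\u015d^u\u00fb^w\u0175^y\u0177^z\u1e91,C\u00c7,D\u1e10,E\u0228,G\u0122,H\u1e28,K\u0136,L\u013b,N\u0145,R\u0156,S\u015e,T\u0162,c\u00e7,d\u1e11,e\u0229,g\u0123,h\u1e29,k\u0137,l\u013c,n\u0146,r\u0157,s\u015f,t\u0163~A\u00c3~E\u1ebc~I\u0128~N\u00d1~O\u00d5~U\u0168~V\u1e7c~Y\u1ef8~a\u00e3~e\u1ebd~i\u0129~n\u00f1~o\u00f5~u\u0169~v\u1e7d~y\u1ef9@A\u00c5@U\u016e@a\u00e5@u\u016f@w\u1e98@y\u1e99"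

def scanTriples : List Char → Char → Char → Option Char
  | a :: b :: d :: rest, m, c => if a == m && b == c then some d else scanTriples rest m c
  | _, _, _ => none

def pairNFC (m b : Char) : List Char :=
  match scanTriples precompData.toList m b with
  | some d => [d]
  | none =>
    match combOf? m with
    | some mk => [b, mk]
    | none => [b]

-- one reversed step: state = (chunks so far, held base char)
def stepB (st : List (List Char) × Option Char) (ch : Char) : List (List Char) × Option Char :=
  match combOf? ch with
  | some _ =>
    match st.2 with
    | some b => (st.1 ++ [pairNFC ch b], none)            -- first marker met in reverse wins
    | none => st
  | none =>
    match st.2 with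
    | some b => (st.1 ++ [[b]], some ch)                  -- flush unmarked base, hold ch
    | none => (st.1, some ch)

def dia_to_unicode_alt (s : String) : String :=
  let st := List.foldl stepB ([], none) s.toList.reverse
  let chunks := match st.2 with
    | some b => st.1 ++ [[b]]
    | none => st.1
  String.ofList chunks.reverse.flatten                    -- "".join(reversed(chunks))

-- ===== PRECONDITION & SPEC =====
def Spec_dia_to_unicode (s : String) (out : String) : Prop := out = dia_to_unicode_alt s
instance (s : String) (out : String) : Decidable (Spec_dia_to_unicode s out) := by unfold Spec_dia_to_unicode; infer_instance

-- ===== CLAIM (what is proved, stated in full; the proofs are below) =====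
def Claim_equal_dia_to_unicode : Prop := ∀ (s : String), Dom_dia_to_unicode s → Spec_dia_to_unicode s (dia_to_unicode s)

-- ===== LEMMAS AND PROOFS =====

-- the un-normalized character list A joins, as a forward recursion carrying the
-- pending combining character exactly as A's loop does
def pairsA : Option Char → List Char → List Char
  | _, [] => []
  | d, c :: cs =>
    match PySem.Dict.get? encodedDiacritics c with
    | some m => pairsA (some m) cs
    | none =>
      (match d with
       | some m => [c, m]
       | none => [c]) ++ pairsA none cs

theorem foldlA_eq_pairsA (cs : List Char) : ∀ (d : Option Char) (acc : List Char),
    (List.foldl stepA (d, acc) cs).2 = acc ++ pairsA d cs := by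
  induction cs with
  | nil => intro d acc; simp [pairsA]
  | cons c cs ih =>
    intro d acc
    simp only [List.foldl, pairsA, stepA]
    cases h : PySem.Dict.get? encodedDiacritics c with
    | some m => simp [ih]
    | none => cases d <;> simp [ih]

set_option maxRecDepth 8000 in
theorem compose_none_of_ascii (a b : Char) (hb : b.toNat < 128) : composePrim a b = none := by
  have h : ∀ e ∈ composeTable, 768 ≤ e.2.1.toNat := by decide
  unfold composePrim
  rw [List.find?_eq_none.mpr]
  · rfl
  · intro e he
    simp only [Bool.and_eq_true, beq_iff_eq, not_and]
    intro _ hbe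
    have := h e he
    rw [hbe] at this
    omega

theorem nfc_cons (x : Char) (rest : List Char)
    (h : ∀ c t, rest = c :: t → c.toNat < 128) : nfc (x :: rest) = x :: nfc rest := by
  cases rest with
  | nil => rfl
  | cons c t =>
    have := compose_none_of_ascii x c (h c t rfl)
    simp [nfc, this]

theorem nfc_pair_append (c mk : Char) (rest : List Char)
    (h : ∀ x t, rest = x :: t → x.toNat < 128) :
    nfc (c :: mk :: rest) = nfc [c, mk] ++ nfc rest := by
  cases hcomp : composePrim c mk with
  | some x =>
    have h1 : nfc (c :: mk :: rest) = x :: nfc rest := by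
      cases rest <;> simp [nfc, hcomp]
    have h2 : nfc [c, mk] = [x] := by simp [nfc, hcomp]
    rw [h1, h2]; rfl
  | none =>
    have h1 : nfc (c :: mk :: rest) = c :: nfc (mk :: rest) := by simp [nfc, hcomp]
    have h2 : nfc [c, mk] = [c, mk] := by simp [nfc, hcomp]
    rw [h1, nfc_cons mk rest h, h2]; rfl

theorem pairsA_head (cs : List Char) : ∀ (d : Option Char) (c : Char) (t : List Char),
    pairsA d cs = c :: t → c ∈ cs := by
  induction cs with
  | nil => intro d c t h; simp [pairsA] at h
  | cons x cs ih =>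
    intro d c t h
    simp only [pairsA] at h
    cases hx : PySem.Dict.get? encodedDiacritics x with
    | some m =>
      rw [hx] at h
      exact List.mem_cons_of_mem _ (ih _ _ _ h)
    | none =>
      rw [hx] at h
      cases d <;> simp_all

-- bridge 1: A's dict test and B's pair-string scan agree on every ASCII character
set_option maxRecDepth 8000 in
theorem dict_eq_comb_range : ∀ n ∈ List.range 128,
    PySem.Dict.get? encodedDiacritics (Char.ofNat n) = combOf? (Char.ofNat n) := by decide

theorem dict_eq_comb (c : Char) (h : c.toNat < 128) :
    PySem.Dict.get? encodedDiacritics c = combOf? c := by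
  have := dict_eq_comb_range c.toNat (List.mem_range.mpr h)
  rwa [Char.ofNat_toNat] at this

-- bridge 2: B's per-pair table equals NFC of base + combining mark, on ASCII pairs
set_option maxRecDepth 100000 in
set_option maxHeartbeats 2000000 in
theorem pair_nfc_range : ∀ n ∈ List.range 128, ∀ k ∈ List.range 128,
    (match combOf? (Char.ofNat n) with
     | some mk => pairNFC (Char.ofNat n) (Char.ofNat k) == nfc [Char.ofNat k, mk]
     | none => true) = true := by decide

theorem pair_nfc_ok (m c mk : Char) (hm : m.toNat < 128) (hc : c.toNat < 128)
    (hmk : combOf? m = some mk) : pairNFC m c = nfc [c, mk] := by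
  have := pair_nfc_range m.toNat (List.mem_range.mpr hm) c.toNat (List.mem_range.mpr hc)
  rw [Char.ofNat_toNat, Char.ofNat_toNat, hmk] at this
  exact eq_of_beq this

-- B's algorithm as a forward recursion carrying the pending MARKER character
def fwd : Option Char → List Char → List Char
  | _, [] => []
  | om, c :: cs =>
    match combOf? c with
    | some _ => fwd (some c) cs
    | none =>
      (match om with
       | some m => pairNFC m c
       | none => [c]) ++ fwd none cs

theorem fwd_nfc (cs : List Char) (hascii : ∀ c ∈ cs, c.toNat < 128) :
    fwd none cs = nfc (pairsA none cs) ∧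
    ∀ m mk, m.toNat < 128 → combOf? m = some mk →
      fwd (some m) cs = nfc (pairsA (some mk) cs) := by
  induction cs with
  | nil => exact ⟨rfl, fun _ _ _ _ => rfl⟩
  | cons c cs ih =>
    have hc : c.toNat < 128 := hascii c List.mem_cons_self
    have hcs : ∀ x ∈ cs, x.toNat < 128 := fun x hx => hascii x (List.mem_cons_of_mem _ hx)
    have ihh := ih hcs
    have hhead : ∀ x t, pairsA (none : Option Char) cs = x :: t → x.toNat < 128 :=
      fun x t h => hcs x (pairsA_head cs none x t h)
    have hdict := dict_eq_comb c hc
    cases hcomb : combOf? c with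
    | some mk =>
      rw [hcomb] at hdict
      constructor
      · simp only [fwd, pairsA, hcomb, hdict]
        exact ihh.2 c mk hc hcomb
      · intro m mk' _ _
        simp only [fwd, pairsA, hcomb, hdict]
        exact ihh.2 c mk hc hcomb
    | none =>
      rw [hcomb] at hdict
      constructor
      · simp only [fwd, pairsA, hcomb, hdict, List.singleton_append]
        rw [nfc_cons c _ hhead, ihh.1]
      · intro m mk hm hmk
        simp only [fwd, pairsA, hcomb, hdict, List.cons_append, List.nil_append]
        rw [nfc_pair_append c mk _ hhead, ihh.1, pair_nfc_ok m c mk hm hc hmk]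

-- the reversed fold of B, read as a foldr, with its two finishing functions
def finishB (st : List (List Char) × Option Char) : List Char :=
  (match st.2 with
   | some b => st.1 ++ [[b]]
   | none => st.1).reverse.flatten

def mfinishB (m : Char) (st : List (List Char) × Option Char) : List Char :=
  (match st.2 with
   | some b => st.1 ++ [pairNFC m b]
   | none => st.1).reverse.flatten

theorem invB (l : List Char) :
    finishB (List.foldr (fun c st => stepB st c) ([], none) l) = fwd none l ∧
    ∀ m, mfinishB m (List.foldr (fun c st => stepB st c) ([], none) l) = fwd (some m) l := by
  induction l with
  | nil => exact ⟨rfl, fun m => rfl⟩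
  | cons c l ih =>
    set st := List.foldr (fun c st => stepB st c) (([] : List (List Char)), (none : Option Char)) l with hst
    simp only [List.foldr_cons, ← hst]
    cases hcomb : combOf? c with
    | some mk =>
      cases hp : st.2 with
      | some b =>
        have hm := ih.2 c
        simp only [mfinishB, hp] at hm
        constructor
        · simp only [stepB, hcomb, hp, fwd, finishB]
          exact hm
        · intro m
          simp only [stepB, hcomb, hp, fwd, mfinishB]
          exact hm
      | none =>
        have hm := ih.2 c
        simp only [mfinishB, hp] at hm
        constructor
        · simp only [stepB, hcomb, hp, fwd, finishB]
          exact hm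
        · intro m
          simp only [stepB, hcomb, hp, fwd, mfinishB]
          exact hm
    | none =>
      have h1 := ih.1
      cases hp : st.2 with
      | some b =>
        simp only [finishB, hp] at h1
        constructor
        · simp only [stepB, hcomb, hp, fwd, finishB]
          rw [List.append_assoc, List.reverse_append, List.flatten_append, ← h1,
              List.reverse_append]
          simp
        · intro m
          simp only [stepB, hcomb, hp, fwd, mfinishB]
          rw [List.append_assoc, List.reverse_append, List.flatten_append, ← h1,
              List.reverse_append]
          simp
      | none =>
        simp only [finishB, hp] at h1
        constructor
        · simp only [stepB, hcomb, hp, fwd, finishB]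
          rw [List.reverse_append, List.flatten_append, ← h1]
          simp
        · intro m
          simp only [stepB, hcomb, hp, fwd, mfinishB]
          rw [List.reverse_append, List.flatten_append, ← h1]
          simp

-- ===== VERDICT (by name: the statement is the Claim_ definition above) =====
theorem dia_to_unicode_spec : Claim_equal_dia_to_unicode := by
  intro s hdom
  have hascii : ∀ c ∈ s.toList, c.toNat < 128 := by
    intro c hc
    have := List.all_eq_true.mp hdom c hc
    simp only [pvDomChar, Bool.or_eq_true, Bool.and_eq_true, decide_eq_true_eq, beq_iff_eq] at this
    omega
  show dia_to_unicode s = dia_to_unicode_alt s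
  unfold dia_to_unicode dia_to_unicode_alt
  rw [foldlA_eq_pairsA, List.nil_append, ← (fwd_nfc s.toList hascii).1]
  rw [List.foldl_reverse]
  have := (invB s.toList).1
  rw [finishB] at this
  rw [← this]
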